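-- pv_equiv track=rewrite | github.com/anthonymiyoro/LeetCodeExercises | coloring_the_blocks/coloring_the_blocks.py | color_the_blocks
-- ===== SOURCE A (Python) =====
-- def color_the_blocks(colors):
--     m = len(colors)
--
--     if m==0:
--         return 0
--
--     # return min for 1 set of houses
--     elif m==1:
--         return min(colors[0][0], colors[0][1], colors[0][2])
--
--     else:
--         n = 3 if m else 0
--         # if expected input loop through each item in list
--         dp = [[0 for i in range(3)] for j in range(m)]
--
--         dp[0] = colors[0]
--
--         # Loop though the full set finding the sum of the minimums
--         for i in range(1, m):
--             dp[i][0] = min(dp[i-1][1],dp[i-1][2]) + colors[i][0]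
--             dp[i][1] = min(dp[i-1][0],dp[i-1][2]) + colors[i][1]
--             dp[i][2] = min(dp[i-1][0],dp[i-1][1]) + colors[i][2]
--
--
--         return min(dp[m-1][0], dp[m-1][1], dp[m-1][2])
-- ===== SOURCE B (Python) =====
-- def omin(a, b):
--     if a is None:
--         return b
--     if b is None:
--         return a
--     return a if a < b else b
--
--
-- def oadd(a, b):
--     if a is None or b is None:
--         return None
--     return a + b
--
--
-- def mat_mul(x, y):
--     return tuple(
--         tuple(omin(omin(oadd(x[s][0], y[0][e]), oadd(x[s][1], y[1][e])),
--                    oadd(x[s][2], y[2][e]))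
--               for e in range(3))
--         for s in range(3))
--
--
-- def color_the_blocks(colors):
--     m = len(colors)
--     if m == 0:
--         return 0
--     if m == 1:
--         return min(colors[0][0], colors[0][1], colors[0][2])
--     # (min,+) transition matrix of block i >= 1: entry [p][c] = cost of giving
--     # the block color c when the previous block has color p (None = forbidden).
--     mats = [((None, row[1], row[2]),
--              (row[0], None, row[2]),
--              (row[0], row[1], None)) for row in colors[1:]]
--     # balanced reduction: (min,+)-multiply adjacent pairs until one matrix is left
--     while len(mats) > 1:
--         nxt = [mat_mul(mats[j], mats[j + 1]) for j in range(0, len(mats) - 1, 2)]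
--         if len(mats) % 2 == 1:
--             nxt.append(mats[-1])
--         mats = nxt
--     p = mats[0]
--     best = None
--     for s in range(3):
--         for e in range(3):
--             best = omin(best, oadd(colors[0][s], p[s][e]))
--     return best
-- ===== Notes on version B (the rewrite author's own statement) =====
-- stated objective: alternative
-- what changed: Replaced A's sequential dp-table recurrence with a (min,+) tropical-matrix formulation: each block becomes a 3x3 transition matrix (None = same-color forbidden), the matrices are reduced by associative (min,+) products of adjacent pairs (balanced reduction), and the answer is the min over colors[0] composed with the resulting matrix.
import Mathlib
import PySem

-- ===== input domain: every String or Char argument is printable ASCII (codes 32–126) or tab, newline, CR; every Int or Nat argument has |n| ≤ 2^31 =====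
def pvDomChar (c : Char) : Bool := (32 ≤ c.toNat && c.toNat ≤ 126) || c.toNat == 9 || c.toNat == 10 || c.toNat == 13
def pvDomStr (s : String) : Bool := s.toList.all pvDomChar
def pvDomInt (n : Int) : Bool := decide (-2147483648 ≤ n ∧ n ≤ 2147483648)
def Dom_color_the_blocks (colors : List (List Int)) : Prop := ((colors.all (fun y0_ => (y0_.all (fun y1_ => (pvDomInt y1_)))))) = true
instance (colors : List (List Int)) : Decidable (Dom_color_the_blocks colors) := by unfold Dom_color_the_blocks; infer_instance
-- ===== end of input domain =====

-- B recasts the DP as a tropical (min,+) matrix problem: each block becomes a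
-- 3×3 transition matrix (None = same-color forbidden), the matrices are reduced
-- by associative (min,+) products of adjacent pairs, and the answer is the min
-- of colors[0] composed with the product matrix (objective: alternative algorithm).


-- ===== PORT A =====
-- one loop iteration: Python's three assignments dp[i][0], dp[i][1], dp[i][2]
-- all read only dp[i-1] and colors[i], so writing row i once with the three
-- computed values is the same row Python leaves in dp.
def aStep (colors : List (List Int)) (dp : List (List Int)) (i : Int) : List (List Int) :=
  dp.set i.toNat
    [min (PySem.List.pyGetD (PySem.List.pyGetD dp (i - 1) []) 1 0)
         (PySem.List.pyGetD (PySem.List.pyGetD dp (i - 1) []) 2 0)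
       + PySem.List.pyGetD (PySem.List.pyGetD colors i []) 0 0,
     min (PySem.List.pyGetD (PySem.List.pyGetD dp (i - 1) []) 0 0)
         (PySem.List.pyGetD (PySem.List.pyGetD dp (i - 1) []) 2 0)
       + PySem.List.pyGetD (PySem.List.pyGetD colors i []) 1 0,
     min (PySem.List.pyGetD (PySem.List.pyGetD dp (i - 1) []) 0 0)
         (PySem.List.pyGetD (PySem.List.pyGetD dp (i - 1) []) 1 0)
       + PySem.List.pyGetD (PySem.List.pyGetD colors i []) 2 0]

def color_the_blocks (colors : List (List Int)) : Int :=
  let m : Int := colors.length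
  if m = 0 then 0
  else if m = 1 then
    min (min (PySem.List.pyGetD (PySem.List.pyGetD colors 0 []) 0 0)
             (PySem.List.pyGetD (PySem.List.pyGetD colors 0 []) 1 0))
        (PySem.List.pyGetD (PySem.List.pyGetD colors 0 []) 2 0)
  else
    let dp : List (List Int) := (List.range m.toNat).map (fun _ => [0, 0, 0])
    let dp := dp.set 0 (PySem.List.pyGetD colors 0 [])
    let dp := (PySem.List.pyRange 1 m 1).foldl (aStep colors) dp
    min (min (PySem.List.pyGetD (PySem.List.pyGetD dp (m - 1) []) 0 0)
             (PySem.List.pyGetD (PySem.List.pyGetD dp (m - 1) []) 1 0))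
        (PySem.List.pyGetD (PySem.List.pyGetD dp (m - 1) []) 2 0)

-- ===== PORT B =====
-- Option Int with none = +infinity (Python's None): min and addition
def omin : Option Int → Option Int → Option Int
  | none, b => b
  | some a, none => some a
  | some a, some b => some (if a < b then a else b)

def oadd : Option Int → Option Int → Option Int
  | some a, some b => some (a + b)
  | _, _ => none

-- Python's 3×3 tuple-of-tuples matrix
structure Mat3 where
  (a00 a01 a02 a10 a11 a12 a20 a21 a22 : Option Int)
deriving DecidableEq, Repr

-- p[s][e] (indices come from range(3))
def mget (x : Mat3) (s e : Int) : Option Int :=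
  if s = 0 then (if e = 0 then x.a00 else if e = 1 then x.a01 else x.a02)
  else if s = 1 then (if e = 0 then x.a10 else if e = 1 then x.a11 else x.a12)
  else (if e = 0 then x.a20 else if e = 1 then x.a21 else x.a22)

-- mat_mul(x, y): the 3×3 (min,+) product, the two comprehensions written out
def matMul (x y : Mat3) : Mat3 :=
  ⟨omin (omin (oadd x.a00 y.a00) (oadd x.a01 y.a10)) (oadd x.a02 y.a20),
   omin (omin (oadd x.a00 y.a01) (oadd x.a01 y.a11)) (oadd x.a02 y.a21),
   omin (omin (oadd x.a00 y.a02) (oadd x.a01 y.a12)) (oadd x.a02 y.a22),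
   omin (omin (oadd x.a10 y.a00) (oadd x.a11 y.a10)) (oadd x.a12 y.a20),
   omin (omin (oadd x.a10 y.a01) (oadd x.a11 y.a11)) (oadd x.a12 y.a21),
   omin (omin (oadd x.a10 y.a02) (oadd x.a11 y.a12)) (oadd x.a12 y.a22),
   omin (omin (oadd x.a20 y.a00) (oadd x.a21 y.a10)) (oadd x.a22 y.a20),
   omin (omin (oadd x.a20 y.a01) (oadd x.a21 y.a11)) (oadd x.a22 y.a21),
   omin (omin (oadd x.a20 y.a02) (oadd x.a21 y.a12)) (oadd x.a22 y.a22)⟩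

-- the transition matrix built from row = colors[i] in B's comprehension
def blockMat (row : List Int) : Mat3 :=
  ⟨none, some (PySem.List.pyGetD row 1 0), some (PySem.List.pyGetD row 2 0),
   some (PySem.List.pyGetD row 0 0), none, some (PySem.List.pyGetD row 2 0),
   some (PySem.List.pyGetD row 0 0), some (PySem.List.pyGetD row 1 0), none⟩

-- one pass of B's while-body: the nxt list (adjacent products, odd leftover kept)
def pairUp : List Mat3 → List Mat3
  | x :: y :: rest => matMul x y :: pairUp rest
  | l => l

-- termination helper for the while loop below
lemma pairUp_length_le : ∀ l : List Mat3, (pairUp l).length ≤ l.length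
  | [] => by simp [pairUp]
  | [_] => by simp [pairUp]
  | _ :: _ :: r => by
    have := pairUp_length_le r
    simp only [pairUp, List.length_cons]
    omega

-- the while loop: mats = pairUp mats until at most one matrix is left
def reduceMats : List Mat3 → List Mat3
  | x :: y :: rest => reduceMats (matMul x y :: pairUp rest)
  | l => l
termination_by l => l.length
decreasing_by
  have := pairUp_length_le rest
  simp
  omega

def color_the_blocks_alt (colors : List (List Int)) : Int :=
  if (colors.length : Int) = 0 then 0
  else if (colors.length : Int) = 1 then
    min (min (PySem.List.pyGetD (PySem.List.pyGetD colors 0 []) 0 0)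
             (PySem.List.pyGetD (PySem.List.pyGetD colors 0 []) 1 0))
        (PySem.List.pyGetD (PySem.List.pyGetD colors 0 []) 2 0)
  else
    match (PySem.List.pyRange 0 3 1).foldl (fun b s =>
      (PySem.List.pyRange 0 3 1).foldl (fun b e =>
        omin b (oadd (some (PySem.List.pyGetD (PySem.List.pyGetD colors 0 []) s 0))
          (mget ((reduceMats ((PySem.List.slice colors (some 1) none).map blockMat)).headD
                   ⟨none, none, none, none, none, none, none, none, none⟩) s e))) b) none with
    | some v => v
    | none => 0  -- unreachable: with m ≥ 2 some color pair is always allowed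

-- ===== PRECONDITION & SPEC =====
-- Pre_ excludes exactly the inputs where A raises IndexError: some row shorter than 3.
def Pre_color_the_blocks (colors : List (List Int)) : Prop :=
  ∀ row ∈ colors, 3 ≤ row.length
instance (colors : List (List Int)) : Decidable (Pre_color_the_blocks colors) := by
  unfold Pre_color_the_blocks; infer_instance
def pvWitness_color_the_blocks : List (List Int) := [[1, 2, 3], [3, 1, 2]]

def Spec_color_the_blocks (colors : List (List Int)) (out : Int) : Prop := out = color_the_blocks_alt colors
instance (colors : List (List Int)) (out : Int) : Decidable (Spec_color_the_blocks colors out) := by unfold Spec_color_the_blocks; infer_instance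

-- ===== CLAIM (what is proved, stated in full; the proofs are below) =====
def Claim_equal_color_the_blocks : Prop := ∀ (colors : List (List Int)), Dom_color_the_blocks colors → Pre_color_the_blocks colors → Spec_color_the_blocks colors (color_the_blocks colors)

-- ===== LEMMAS AND PROOFS =====

-- --- Option-Int (min,+) algebra ---
lemma omin_some_some (a b : Int) : omin (some a) (some b) = some (min a b) := by
  simp only [omin, min_def, Option.some.injEq]
  split_ifs <;> omega

lemma omin_comm (a b : Option Int) : omin a b = omin b a := by
  cases a <;> cases b <;> simp only [omin, Option.some.injEq] <;>
    (try split_ifs) <;> (first | rfl | omega)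

lemma omin_assoc (a b c : Option Int) : omin (omin a b) c = omin a (omin b c) := by
  cases a <;> cases b <;> cases c <;> simp only [omin, Option.some.injEq] <;>
    (try split_ifs) <;> (first | rfl | omega)

lemma omin_left_comm (a b c : Option Int) : omin a (omin b c) = omin b (omin a c) := by
  rw [← omin_assoc, omin_comm a b, omin_assoc]

lemma oadd_assoc (a b c : Option Int) : oadd (oadd a b) c = oadd a (oadd b c) := by
  cases a <;> cases b <;> cases c <;> simp [oadd, Int.add_assoc]

lemma oadd_omin_left (a b c : Option Int) : oadd a (omin b c) = omin (oadd a b) (oadd a c) := by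
  cases a <;> cases b <;> cases c <;> simp only [oadd, omin, Option.some.injEq] <;>
    (try split_ifs) <;> (first | rfl | omega)

lemma oadd_omin_right (a b c : Option Int) : oadd (omin a b) c = omin (oadd a c) (oadd b c) := by
  cases a <;> cases b <;> cases c <;> simp only [oadd, omin, Option.some.injEq] <;>
    (try split_ifs) <;> (first | rfl | omega)

-- --- the (min,+) product is associative ---
set_option maxHeartbeats 1600000 in
lemma matMul_assoc (x y z : Mat3) : matMul (matMul x y) z = matMul x (matMul y z) := by
  simp only [matMul, Mat3.mk.injEq]
  refine ⟨?_, ?_, ?_, ?_, ?_, ?_, ?_, ?_, ?_⟩ <;>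
    · simp only [oadd_omin_left, oadd_omin_right, oadd_assoc]
      simp [omin_comm, omin_left_comm]

lemma foldl_pairUp : ∀ (l : List Mat3) (a : Mat3), (pairUp l).foldl matMul a = l.foldl matMul a
  | [], _ => rfl
  | [_], _ => rfl
  | x :: y :: r, a => by
    simp only [pairUp, List.foldl_cons]
    rw [foldl_pairUp r, matMul_assoc]

lemma reduceMats_eq : ∀ (x : Mat3) (l : List Mat3), reduceMats (x :: l) = [l.foldl matMul x]
  | x, [] => by simp [reduceMats]
  | x, y :: r => by
    rw [show reduceMats (x :: y :: r) = reduceMats (matMul x y :: pairUp r) from by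
          rw [reduceMats]]
    rw [reduceMats_eq (matMul x y) (pairUp r), foldl_pairUp, List.foldl_cons]
termination_by _ l => l.length
decreasing_by
  have := pairUp_length_le r
  simp
  omega

-- --- applying the cost vector of block 0 to a matrix ---
def appT (v : Option Int × Option Int × Option Int) (t : Mat3) :
    Option Int × Option Int × Option Int :=
  (omin (omin (oadd v.1 t.a00) (oadd v.2.1 t.a10)) (oadd v.2.2 t.a20),
   omin (omin (oadd v.1 t.a01) (oadd v.2.1 t.a11)) (oadd v.2.2 t.a21),
   omin (omin (oadd v.1 t.a02) (oadd v.2.1 t.a12)) (oadd v.2.2 t.a22))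

set_option maxHeartbeats 1600000 in
lemma appT_matMul (v : Option Int × Option Int × Option Int) (p t : Mat3) :
    appT v (matMul p t) = appT (appT v p) t := by
  simp only [appT, matMul, Prod.mk.injEq]
  refine ⟨?_, ?_, ?_⟩ <;>
    · simp only [oadd_omin_left, oadd_omin_right, oadd_assoc]
      simp [omin_comm, omin_left_comm]

lemma appT_foldl : ∀ (ms : List Mat3) (v : Option Int × Option Int × Option Int) (M : Mat3),
    appT v (ms.foldl matMul M) = ms.foldl appT (appT v M)
  | [], _, _ => rfl
  | t :: ms, v, M => by
    simp only [List.foldl_cons]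
    rw [appT_foldl ms, appT_matMul]

-- --- the scalar recurrence (proof-only; A's dp step and B's vector step agree on it) ---
def tstep (s : Int × Int × Int) (row : List Int) : Int × Int × Int :=
  (min s.2.1 s.2.2 + PySem.List.pyGetD row 0 0,
   min s.1 s.2.2 + PySem.List.pyGetD row 1 0,
   min s.1 s.2.1 + PySem.List.pyGetD row 2 0)

def someT (s : Int × Int × Int) : Option Int × Option Int × Option Int :=
  (some s.1, some s.2.1, some s.2.2)

lemma appT_blockMat (a b c : Int) (row : List Int) :
    appT (someT (a, b, c)) (blockMat row) = someT (tstep (a, b, c) row) := by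
  simp only [appT, someT, blockMat, tstep, oadd, omin, Prod.mk.injEq, Option.some.injEq]
  refine ⟨?_, ?_, ?_⟩ <;> · rw [min_def]; split_ifs <;> omega

lemma foldl_appT_blockMat : ∀ (l : List (List Int)) (s : Int × Int × Int),
    (l.map blockMat).foldl appT (someT s) = someT (l.foldl tstep s)
  | [], _ => rfl
  | row :: l, (a, b, c) => by
    simp only [List.map_cons, List.foldl_cons]
    rw [appT_blockMat, foldl_appT_blockMat l]

-- --- A-side machinery: dp state after k loop iterations vs the scalar recurrence ---
def dpInit (first : List Int) (rest : List (List Int)) : List (List Int) :=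
  ((List.range (rest.length + 1)).map (fun _ => ([0, 0, 0] : List Int))).set 0
    (PySem.List.pyGetD (first :: rest) 0 [])

def dpFold (first : List Int) (rest : List (List Int)) (k : Nat) : List (List Int) :=
  (PySem.List.pyRange 1 (1 + (k : Int)) 1).foldl (aStep (first :: rest)) (dpInit first rest)

def tripFold (first : List Int) (rest : List (List Int)) (k : Nat) : Int × Int × Int :=
  (rest.take k).foldl tstep
    (PySem.List.pyGetD first 0 0, PySem.List.pyGetD first 1 0, PySem.List.pyGetD first 2 0)

lemma pyGetD_cons_succ (first : List Int) (rest : List (List Int)) (k : Nat) (hk : k < rest.length) :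
    PySem.List.pyGetD (first :: rest) (1 + (k : Int)) [] = rest[k] := by
  rw [show (1 + (k : Int)) = ((k + 1 : Nat) : Int) by push_cast; ring,
      PySem.List.pyGetD_natCast]
  simp [List.getD, hk]

lemma pyGetD_set_succ (dp : List (List Int)) (k : Nat) (v : List Int) (h : k + 1 < dp.length) :
    PySem.List.pyGetD (dp.set (k + 1) v) (((k + 1 : Nat) : Int)) [] = v := by
  rw [PySem.List.pyGetD_natCast]
  simp [List.getD, h]

-- loop invariant: after k iterations A's dp row k carries exactly the scalar state
lemma dpFold_inv (first : List Int) (rest : List (List Int)) (k : Nat) (hk : k ≤ rest.length) :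
    (dpFold first rest k).length = rest.length + 1 ∧
    PySem.List.pyGetD (PySem.List.pyGetD (dpFold first rest k) ((k : Nat) : Int) []) 0 0
      = (tripFold first rest k).1 ∧
    PySem.List.pyGetD (PySem.List.pyGetD (dpFold first rest k) ((k : Nat) : Int) []) 1 0
      = (tripFold first rest k).2.1 ∧
    PySem.List.pyGetD (PySem.List.pyGetD (dpFold first rest k) ((k : Nat) : Int) []) 2 0
      = (tripFold first rest k).2.2 := by
  induction k with
  | zero =>
    have h0 : dpFold first rest 0 = dpInit first rest := by
      simp [dpFold, PySem.List.pyRange_one_eq_nil (by omega : (1 : Int) ≤ 1)]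
    have hget : PySem.List.pyGetD (dpInit first rest) (0 : Int) [] = first := by
      have h := PySem.List.pyGetD_natCast (xs := dpInit first rest) (n := 0) (d := ([] : List Int))
      simp only [Nat.cast_zero] at h
      rw [h]
      simp [dpInit, List.getD]
    refine ⟨by simp [h0, dpInit], ?_, ?_, ?_⟩ <;>
      simp only [Nat.cast_zero, h0, hget, tripFold, List.take_zero, List.foldl_nil]
  | succ k ih =>
    have hk' : k < rest.length := by omega
    obtain ⟨ihlen, ih0, ih1, ih2⟩ := ih (by omega)
    have hstep : dpFold first rest (k + 1)
        = aStep (first :: rest) (dpFold first rest k) (1 + (k : Int)) := by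
      unfold dpFold
      rw [show (1 + ((k + 1 : Nat) : Int)) = (1 + (k : Int)) + 1 by push_cast; ring,
          PySem.List.pyRange_one_succ_right (by omega), List.foldl_append]
      rfl
    obtain ⟨a, b, c, habc⟩ : ∃ a b c, tripFold first rest k = (a, b, c) :=
      ⟨_, _, _, rfl⟩
    rw [habc] at ih0 ih1 ih2
    have htrip : tripFold first rest (k + 1) = tstep (a, b, c) rest[k] := by
      rw [← habc]
      unfold tripFold
      rw [List.take_add_one, List.getElem?_eq_getElem hk',
          Option.toList_some, List.foldl_append, List.foldl_cons, List.foldl_nil]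
    have haStep : aStep (first :: rest) (dpFold first rest k) (1 + (k : Int))
        = (dpFold first rest k).set (k + 1)
            [min b c + PySem.List.pyGetD rest[k] 0 0,
             min a c + PySem.List.pyGetD rest[k] 1 0,
             min a b + PySem.List.pyGetD rest[k] 2 0] := by
      unfold aStep
      rw [show (1 + (k : Int)) - 1 = ((k : Nat) : Int) by ring]
      rw [pyGetD_cons_succ first rest k hk']
      rw [ih0, ih1, ih2]
      congr 1
      omega
    have hset : PySem.List.pyGetD (dpFold first rest (k + 1)) (((k + 1 : Nat) : Int)) []
        = [min b c + PySem.List.pyGetD rest[k] 0 0,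
           min a c + PySem.List.pyGetD rest[k] 1 0,
           min a b + PySem.List.pyGetD rest[k] 2 0] := by
      rw [hstep, haStep]
      exact pyGetD_set_succ _ _ _ (by omega)
    refine ⟨?_, ?_, ?_, ?_⟩
    · rw [hstep, haStep]; simp [ihlen]
    all_goals rw [hset, htrip]
    all_goals rfl

-- B's 9-term accumulation loop, regrouped column-wise as appT
lemma best_loop_eq (f : Int → Int) (p : Mat3) :
    ((PySem.List.pyRange 0 3 1).foldl (fun b s =>
      (PySem.List.pyRange 0 3 1).foldl (fun b e =>
        omin b (oadd (some (f s)) (mget p s e))) b) none)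
    = omin (omin (appT (some (f 0), some (f 1), some (f 2)) p).1
                 (appT (some (f 0), some (f 1), some (f 2)) p).2.1)
           (appT (some (f 0), some (f 1), some (f 2)) p).2.2 := by
  rw [show PySem.List.pyRange 0 3 1 = [0, 1, 2] from by decide]
  simp only [List.foldl_cons, List.foldl_nil, appT]
  norm_num [mget]
  simp [omin_assoc, omin_comm, omin_left_comm,
        show ∀ b : Option Int, omin none b = b from fun b => rfl]

-- ===== VERDICT (by name: the statement is the Claim_ definition above) =====
theorem color_the_blocks_spec : Claim_equal_color_the_blocks := by
  intro colors _ _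
  unfold Spec_color_the_blocks
  match colors with
  | [] => rfl
  | [first] => rfl
  | first :: r2 :: rest2 =>
    obtain ⟨ihlen, ih0, ih1, ih2⟩ :=
      dpFold_inv first (r2 :: rest2) (r2 :: rest2).length le_rfl
    have hm : ((first :: r2 :: rest2).length : Int) = 1 + ((r2 :: rest2).length : Int) := by
      simp; ring
    -- A's value in terms of the scalar recurrence
    have hfold : color_the_blocks (first :: r2 :: rest2)
        = min (min (tripFold first (r2 :: rest2) (r2 :: rest2).length).1
                   (tripFold first (r2 :: rest2) (r2 :: rest2).length).2.1)
              (tripFold first (r2 :: rest2) (r2 :: rest2).length).2.2 := by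
      rw [← ih0, ← ih1, ← ih2]
      unfold color_the_blocks dpFold dpInit
      rw [if_neg (by simp; omega), if_neg (by simp; omega)]
      rw [hm]
      rw [show (1 + ((r2 :: rest2).length : Int)).toNat = (r2 :: rest2).length + 1 by omega]
      rw [show (1 + ((r2 :: rest2).length : Int)) - 1 = (((r2 :: rest2).length : Nat) : Int) by ring]
    -- B's value in terms of the same recurrence
    have c0 : PySem.List.pyGetD (first :: r2 :: rest2) 0 [] = first :=
      PySem.List.pyGetD_zero_cons _ _ _
    have hslice : PySem.List.slice (first :: r2 :: rest2) (some 1) none = r2 :: rest2 := by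
      rw [PySem.List.slice_from_one]; rfl
    have hred : reduceMats ((r2 :: rest2).map blockMat)
        = [(rest2.map blockMat).foldl matMul (blockMat r2)] := by
      rw [List.map_cons, reduceMats_eq]
    have happ : appT (some (PySem.List.pyGetD first 0 0), some (PySem.List.pyGetD first 1 0),
                      some (PySem.List.pyGetD first 2 0))
          ((rest2.map blockMat).foldl matMul (blockMat r2))
        = someT (tripFold first (r2 :: rest2) (r2 :: rest2).length) := by
      rw [show ((some (PySem.List.pyGetD first 0 0), some (PySem.List.pyGetD first 1 0),
                 some (PySem.List.pyGetD first 2 0)) :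
              Option Int × Option Int × Option Int)
            = someT (PySem.List.pyGetD first 0 0, PySem.List.pyGetD first 1 0,
                     PySem.List.pyGetD first 2 0) from rfl]
      rw [appT_foldl, appT_blockMat, foldl_appT_blockMat]
      unfold tripFold
      rw [List.take_length, List.foldl_cons]
    have halt : color_the_blocks_alt (first :: r2 :: rest2)
        = min (min (tripFold first (r2 :: rest2) (r2 :: rest2).length).1
                   (tripFold first (r2 :: rest2) (r2 :: rest2).length).2.1)
              (tripFold first (r2 :: rest2) (r2 :: rest2).length).2.2 := by
      unfold color_the_blocks_alt
      rw [if_neg (by simp; omega), if_neg (by simp; omega)]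
      simp only [hslice, hred, List.headD_cons, c0]
      rw [best_loop_eq (fun s => PySem.List.pyGetD first s 0)]
      rw [happ]
      simp only [someT, omin_some_some]
    rw [hfold, halt]
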